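-- pv_equiv track=rewrite | github.com/canyangliunian/Agent-skills | ABS-Journal/scripts/ajg_fetch.py | choose_column_order
-- ===== SOURCE A (Python) =====
-- from typing import Any, Dict, Iterable, Iterator, List, Optional, Tuple
--
-- def choose_column_order(columns: List[str]) -> List[str]:
--     # Priority groups
--     priority = [
--         "journal_title",
--         "title",
--         "journal",
--         "issn",
--         "issn_print",
--         "issn_online",
--         "ajg_rating",
--         "rating",
--         "rank",
--         "subject_area",
--         "field",
--         "category",
--         "publisher",
--         "ajg_year",
--         "source_url",
--         "retrieved_at_utc",
--     ]
--
--     cols = list(dict.fromkeys(columns))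
--     pri = [c for c in priority if c in cols]
--     rest = sorted([c for c in cols if c not in pri])
--     return pri + rest
-- ===== SOURCE B (Python) =====
-- from typing import List
--
-- def choose_column_order(columns: List[str]) -> List[str]:
--     priority = [
--         "journal_title",
--         "title",
--         "journal",
--         "issn",
--         "issn_print",
--         "issn_online",
--         "ajg_rating",
--         "rating",
--         "rank",
--         "subject_area",
--         "field",
--         "category",
--         "publisher",
--         "ajg_year",
--         "source_url",
--         "retrieved_at_utc",
--     ]
--     rank = {name: i for i, name in enumerate(priority)}
--     return sorted(dict.fromkeys(columns), key=lambda c: (rank.get(c, len(priority)), c))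
-- ===== Notes on version B (the rewrite author's own statement) =====
-- stated objective: idiomatic
-- what changed: Replaced the two membership-filter passes plus separate sort and concatenation with one key-based sort: a rank dict maps each priority name to its index and sorted(dict.fromkeys(columns), key=lambda c: (rank.get(c, len(priority)), c)) orders everything in a single pass.
import Mathlib
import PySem

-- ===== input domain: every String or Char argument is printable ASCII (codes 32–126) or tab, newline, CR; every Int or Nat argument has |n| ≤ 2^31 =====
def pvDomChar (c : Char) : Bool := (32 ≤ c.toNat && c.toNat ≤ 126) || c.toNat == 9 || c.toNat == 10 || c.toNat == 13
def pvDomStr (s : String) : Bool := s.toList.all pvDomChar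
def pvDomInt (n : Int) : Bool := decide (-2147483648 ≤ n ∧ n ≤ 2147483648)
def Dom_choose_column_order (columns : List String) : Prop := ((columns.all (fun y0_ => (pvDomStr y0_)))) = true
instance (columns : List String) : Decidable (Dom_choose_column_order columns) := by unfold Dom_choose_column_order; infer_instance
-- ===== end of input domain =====

-- B replaces A's two membership filters + separate sort + concatenation by one key-based
-- sort over a rank dict (priority index, sentinel = len(priority), name tie-break); idiomatic, same result.

-- the shared literal priority list of both Pythons
def pvPriority : List String :=
  [ "journal_title", "title", "journal", "issn", "issn_print", "issn_online",
    "ajg_rating", "rating", "rank", "subject_area", "field", "category",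
    "publisher", "ajg_year", "source_url", "retrieved_at_utc" ]

-- ===== PORT A =====
def choose_column_order (columns : List String) : List String :=
  let priority := pvPriority
  let cols := PySem.List.dedup columns
  let pri := priority.filter (fun c => cols.contains c)
  let rest := PySem.List.sorted (cols.filter (fun c => !pri.contains c)) (fun c => c)
  pri ++ rest

-- ===== PORT B =====
def choose_column_order_alt (columns : List String) : List String :=
  let rank : PySem.Dict String Int :=
    (PySem.List.enumerate pvPriority).foldl (fun d p => PySem.Dict.insert d p.2 p.1) PySem.Dict.empty
  PySem.List.sorted2 (PySem.List.dedup columns)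
    (fun c => PySem.Dict.getD rank c (pvPriority.length : Int))
    (fun c => c)

-- ===== PRECONDITION & SPEC =====
def Spec_choose_column_order (columns : List String) (out : List String) : Prop := out = choose_column_order_alt columns
instance (columns : List String) (out : List String) : Decidable (Spec_choose_column_order columns out) := by unfold Spec_choose_column_order; infer_instance

-- ===== CLAIM (what is proved, stated in full; the proofs are below) =====
def Claim_equal_choose_column_order : Prop := ∀ (columns : List String), Dom_choose_column_order columns → Spec_choose_column_order columns (choose_column_order columns)

-- ===== LEMMAS AND PROOFS =====

-- B's rank dict, named for the proofs (definitionally the `let rank` of the port)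
def pvRank : PySem.Dict String Int :=
  (PySem.List.enumerate pvPriority).foldl (fun d p => PySem.Dict.insert d p.2 p.1) PySem.Dict.empty

-- B's sort key, as a single lexicographic key
def pvKey (c : String) : Lex (Int × String) := toLex (PySem.Dict.getD pvRank c 16, c)

-- sorted2 with two keys is sorted with the lexicographic pair key
theorem pv_sorted2_eq_sorted_lex {α : Type} (xs : List α) (k1 : α → Int) (k2 : α → String) :
    PySem.List.sorted2 xs k1 k2 = PySem.List.sorted xs (fun x => toLex (k1 x, k2 x)) := by
  rw [PySem.List.sorted_eq_foldl_insertBy]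
  show List.foldl (fun acc x => PySem.List.insertBy
      (fun a b => decide (k1 a < k1 b) || (!decide (k1 b < k1 a) && decide (k2 a < k2 b))) x acc) [] xs = _
  congr 1
  funext acc x
  congr 1
  funext a b
  rw [Bool.eq_iff_iff]
  simp only [Bool.or_eq_true, Bool.and_eq_true, Bool.not_eq_true', decide_eq_true_eq,
    decide_eq_false_iff_not, Prod.Lex.toLex_lt_toLex]
  constructor
  · rintro (h | ⟨h1, h2⟩)
    · exact Or.inl h
    · rcases lt_trichotomy (k1 a) (k1 b) with h' | h' | h'
      · exact Or.inl h'
      · exact Or.inr ⟨h', h2⟩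
      · exact absurd h' h1
  · rintro (h | ⟨h1, h2⟩)
    · exact Or.inl h
    · exact Or.inr ⟨by simp [h1], h2⟩

theorem pv_rank_lt : ∀ a ∈ pvPriority, PySem.Dict.getD pvRank a 16 < 16 := by decide

theorem pv_rank_pair :
    pvPriority.Pairwise (fun a b => PySem.Dict.getD pvRank a 16 < PySem.Dict.getD pvRank b 16) := by
  decide

theorem pv_rank_default (c : String) (hc : c ∉ pvPriority) : PySem.Dict.getD pvRank c 16 = 16 := by
  have hk : pvRank.keys = pvPriority := by decide
  have hn : pvRank.get? c = none := by
    rw [PySem.Dict.get?_eq_none_iff_not_mem_keys, hk]; exact hc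
  rw [PySem.Dict.getD, hn]; rfl

theorem pv_priority_nodup : pvPriority.Nodup := by decide

-- the core equality, over any deduplicated column list
theorem pv_core (cols : List String) (hcolsN : cols.Nodup) :
    (pvPriority.filter (fun c => cols.contains c)) ++
      PySem.List.sorted
        (cols.filter (fun c => !((pvPriority.filter (fun c => cols.contains c)).contains c)))
        (fun c => c)
      = PySem.List.sorted cols pvKey := by
  set pri := pvPriority.filter (fun c => cols.contains c) with hpri
  set restF := cols.filter (fun c => !pri.contains c) with hrestF
  set rest := PySem.List.sorted restF (fun c => c) with hrest
  have hpriN : pri.Nodup := pv_priority_nodup.filter _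
  have hrestFN : restF.Nodup := hcolsN.filter _
  have hrestP : rest.Perm restF := PySem.List.sorted_perm restF (fun c => c) false
  have hrestN : rest.Nodup := hrestP.nodup_iff.mpr hrestFN
  have hmem_pri : ∀ c, c ∈ pri ↔ c ∈ pvPriority ∧ c ∈ cols := by
    intro c; simp [hpri, List.mem_filter]
  have hmem_rest : ∀ c, c ∈ rest ↔ c ∈ cols ∧ c ∉ pvPriority := by
    intro c
    rw [hrest, PySem.List.mem_sorted, hrestF, List.mem_filter]
    simp only [Bool.not_eq_eq_eq_not, Bool.not_true, ← Bool.not_eq_true, List.contains_eq_mem,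
      decide_eq_true_eq]
    constructor
    · rintro ⟨hm1, hm2⟩
      exact ⟨hm1, fun hP => hm2 ((hmem_pri c).mpr ⟨hP, hm1⟩)⟩
    · rintro ⟨hm1, hm2⟩
      exact ⟨hm1, fun hp => hm2 ((hmem_pri c).mp hp).1⟩
  have hdisj : ∀ a ∈ pri, a ∉ rest := by
    intro a ha hr
    exact ((hmem_rest a).mp hr).2 ((hmem_pri a).mp ha).1
  have happN : (pri ++ rest).Nodup := by
    rw [List.nodup_append]
    exact ⟨hpriN, hrestN, fun a ha b hb he => hdisj a ha (he ▸ hb)⟩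
  have hperm : (pri ++ rest).Perm cols := by
    rw [List.perm_ext_iff_of_nodup happN hcolsN]
    intro a
    rw [List.mem_append, hmem_pri, hmem_rest]
    constructor
    · rintro (⟨_, h⟩ | ⟨h, _⟩) <;> exact h
    · intro h
      by_cases hP : a ∈ pvPriority
      · exact Or.inl ⟨hP, h⟩
      · exact Or.inr ⟨h, hP⟩
  have hpair : (pri ++ rest).Pairwise (fun a b => pvKey a < pvKey b) := by
    rw [List.pairwise_append]
    refine ⟨?_, ?_, ?_⟩
    · exact (pv_rank_pair.filter _).imp
        (fun h => Prod.Lex.toLex_lt_toLex.mpr (Or.inl h))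
    · have hle : rest.Pairwise (fun a b => a ≤ b) :=
        PySem.List.sorted_pairwise restF (fun c => c)
      have hne : rest.Pairwise (fun a b => a ≠ b) := hrestN
      refine (hle.and hne).imp_of_mem ?_
      intro a b ha hb h
      have hra : PySem.Dict.getD pvRank a 16 = 16 := pv_rank_default a ((hmem_rest a).mp ha).2
      have hrb : PySem.Dict.getD pvRank b 16 = 16 := pv_rank_default b ((hmem_rest b).mp hb).2
      exact Prod.Lex.toLex_lt_toLex.mpr (Or.inr ⟨by rw [hra, hrb], lt_of_le_of_ne h.1 h.2⟩)
    · intro a ha b hb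
      have hra : PySem.Dict.getD pvRank a 16 < 16 := pv_rank_lt a ((hmem_pri a).mp ha).1
      have hrb : PySem.Dict.getD pvRank b 16 = 16 := pv_rank_default b ((hmem_rest b).mp hb).2
      exact Prod.Lex.toLex_lt_toLex.mpr (Or.inl (by rw [hrb]; exact hra))
  exact (PySem.List.sorted_eq_of_perm_of_pairwise_lt cols (pri ++ rest) pvKey hperm hpair).symm

theorem pv_main (columns : List String) :
    choose_column_order columns = choose_column_order_alt columns := by
  have halt : choose_column_order_alt columns
      = PySem.List.sorted (PySem.List.dedup columns) pvKey := by
    show PySem.List.sorted2 (PySem.List.dedup columns)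
        (fun c => PySem.Dict.getD pvRank c 16) (fun c => c) = _
    rw [pv_sorted2_eq_sorted_lex]
    rfl
  rw [halt]
  exact pv_core (PySem.List.dedup columns) (PySem.List.nodup_dedup columns)

-- ===== VERDICT (by name: the statement is the Claim_ definition above) =====
theorem choose_column_order_spec : Claim_equal_choose_column_order := by
  intro columns _
  unfold Spec_choose_column_order
  exact pv_main columns
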